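-- pv_equiv track=rewrite | github.com/upamanyu92/stocksense | app/utils/symbol_utils.py | get_exchange
-- ===== SOURCE A (Python) =====
-- KNOWN_SUFFIXES = {'.NS', '.BO', '.L', '.HK', '.T', '.AX', '.TO', '.SI', '.KS'}
--
-- def get_exchange(symbol: str) -> str:
--     """Detect the exchange from a symbol's suffix."""
--     if not symbol:
--         return 'UNKNOWN'
--     symbol = symbol.upper()
--     if symbol.endswith('.NS'):
--         return 'NSE'
--     if symbol.endswith('.BO'):
--         return 'BSE'
--     if symbol.endswith('.L'):
--         return 'LSE'
--     if symbol.endswith('.HK'):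
--         return 'HKEX'
--     if symbol.endswith('.T'):
--         return 'TSE'
--     # No suffix - assume US market
--     if not any(symbol.endswith(s) for s in KNOWN_SUFFIXES):
--         return 'US'
--     return 'UNKNOWN'
-- ===== SOURCE B (Python) =====
-- SUFFIX_MAP = {
--     '.NS': 'NSE', '.BO': 'BSE', '.L': 'LSE', '.HK': 'HKEX', '.T': 'TSE',
--     '.AX': 'UNKNOWN', '.TO': 'UNKNOWN', '.SI': 'UNKNOWN', '.KS': 'UNKNOWN',
-- }
--
-- def get_exchange(symbol: str) -> str:
--     """Detect the exchange from a symbol's suffix."""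
--     if not symbol:
--         return 'UNKNOWN'
--     symbol = symbol.upper()
--     idx = symbol.rfind('.')
--     if idx == -1:
--         return 'US'
--     return SUFFIX_MAP.get(symbol[idx:], 'US')
-- ===== Notes on version B (the rewrite author's own statement) =====
-- stated objective: idiomatic
-- what changed: Replaces the sequential chain of endswith checks plus an any() scan over the suffix set with a single rfind for the last dot and one dict lookup of that suffix.
import Mathlib
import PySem

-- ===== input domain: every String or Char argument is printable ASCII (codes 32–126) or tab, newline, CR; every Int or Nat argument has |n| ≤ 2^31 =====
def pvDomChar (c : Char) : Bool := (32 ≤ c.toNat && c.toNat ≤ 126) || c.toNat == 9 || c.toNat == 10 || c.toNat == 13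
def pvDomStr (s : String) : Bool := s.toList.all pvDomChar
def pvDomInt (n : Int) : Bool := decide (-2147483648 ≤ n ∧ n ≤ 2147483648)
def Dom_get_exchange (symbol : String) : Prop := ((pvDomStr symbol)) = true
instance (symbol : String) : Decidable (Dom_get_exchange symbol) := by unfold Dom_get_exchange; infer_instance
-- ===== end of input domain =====

-- B replaces A's chain of endswith checks plus an any() scan by one rfind of the
-- last dot and a single dict lookup of that suffix (objective: idiomatic).

-- ===== PORT A =====
def KNOWN_SUFFIXES : PySem.Set String :=
  PySem.Set.ofList [".NS", ".BO", ".L", ".HK", ".T", ".AX", ".TO", ".SI", ".KS"]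

def get_exchange (symbol : String) : String :=
  if symbol = "" then "UNKNOWN"
  else
    let symbol := PySem.Str.upper symbol
    if PySem.Str.endswith symbol ".NS" then "NSE"
    else if PySem.Str.endswith symbol ".BO" then "BSE"
    else if PySem.Str.endswith symbol ".L" then "LSE"
    else if PySem.Str.endswith symbol ".HK" then "HKEX"
    else if PySem.Str.endswith symbol ".T" then "TSE"
    else if !(KNOWN_SUFFIXES.any (fun s => PySem.Str.endswith symbol s)) then "US"
    else "UNKNOWN"

-- ===== PORT B =====
def SUFFIX_MAP : PySem.Dict String String :=
  ⟨[(".NS", "NSE"), (".BO", "BSE"), (".L", "LSE"), (".HK", "HKEX"), (".T", "TSE"),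
    (".AX", "UNKNOWN"), (".TO", "UNKNOWN"), (".SI", "UNKNOWN"), (".KS", "UNKNOWN")]⟩

def get_exchange_alt (symbol : String) : String :=
  if symbol = "" then "UNKNOWN"
  else
    let symbol := PySem.Str.upper symbol
    let idx := PySem.Str.rfind symbol "."
    if idx = -1 then "US"
    else SUFFIX_MAP.getD (PySem.Str.slice symbol (some idx)) "US"

-- ===== PRECONDITION & SPEC =====
def Spec_get_exchange (symbol : String) (out : String) : Prop := out = get_exchange_alt symbol
instance (symbol : String) (out : String) : Decidable (Spec_get_exchange symbol out) := by unfold Spec_get_exchange; infer_instance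

-- ===== CLAIM (what is proved, stated in full; the proofs are below) =====
def Claim_equal_get_exchange : Prop := ∀ (symbol : String), Dom_get_exchange symbol → Spec_get_exchange symbol (get_exchange symbol)

-- ===== LEMMAS AND PROOFS =====

-- ['.'] is a prefix of xs iff xs starts with '.'
theorem pv_prefix_dot (xs : List Char) : (['.'].isPrefixOf xs = true) ↔ xs[0]? = some '.' := by
  rw [List.isPrefixOf_iff_prefix]
  cases xs with
  | nil => simp
  | cons c cs => rw [List.cons_prefix_iff]; simp

-- spec of the worker of Chars.rfind for the single-character needle ['.']
theorem pv_go_zero (l : List Char) :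
    PySem.Chars.rfind.go l ['.'] 0 = if ['.'].isPrefixOf l = true then 0 else -1 := by
  rw [PySem.Chars.rfind.go.eq_def]

theorem pv_go_succ (l : List Char) (k : ℕ) :
    PySem.Chars.rfind.go l ['.'] (k + 1) =
      if ['.'].isPrefixOf (List.drop (k + 1) l) = true then ((k : ℤ) + 1) else PySem.Chars.rfind.go l ['.'] k := by
  rw [PySem.Chars.rfind.go.eq_def]
  norm_num

theorem pv_go_spec (l : List Char) (n : ℕ) :
    (PySem.Chars.rfind.go l ['.'] n = -1 ∧ ∀ j ≤ n, l[j]? ≠ some '.') ∨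
    (∃ m : ℕ, PySem.Chars.rfind.go l ['.'] n = (m : ℤ) ∧ m ≤ n ∧ l[m]? = some '.' ∧
      ∀ j, m < j → j ≤ n → l[j]? ≠ some '.') := by
  induction n with
  | zero =>
    rw [pv_go_zero]
    by_cases h : l[0]? = some '.'
    · right
      refine ⟨0, ?_, Nat.le_refl 0, h, by omega⟩
      rw [if_pos ((pv_prefix_dot l).2 (by simpa using h))]; norm_num
    · left
      constructor
      · rw [if_neg (fun hp => h ((pv_prefix_dot l).1 hp))]
      · intro j hj; interval_cases j; exact h
  | succ k ih =>
    rw [pv_go_succ]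
    by_cases h : l[k+1]? = some '.'
    · right
      refine ⟨k+1, ?_, Nat.le_refl _, h, by omega⟩
      rw [if_pos]
      · push_cast; ring
      · rw [pv_prefix_dot]; simpa using h
    · have hnp : ¬ (['.'].isPrefixOf (List.drop (k+1) l) = true) := by
        rw [pv_prefix_dot]; simpa using h
      rw [if_neg hnp]
      rcases ih with ⟨he, hall⟩ | ⟨m, he, hm, hdot, hafter⟩
      · left
        refine ⟨he, fun j hj => ?_⟩
        rcases Nat.lt_or_ge j (k+1) with hlt | hge
        · exact hall j (by omega)
        · have : j = k + 1 := by omega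
          subst this; exact h
      · right
        refine ⟨m, he, by omega, hdot, fun j hmj hj => ?_⟩
        rcases Nat.lt_or_ge j (k+1) with hlt | hge
        · exact hafter j hmj (by omega)
        · have : j = k + 1 := by omega
          subst this; exact h

-- uniqueness helper: if the suffix of l after position m is '.'::t with t dot-free,
-- then a dot-headed dot-free-tailed suffix of l is exactly '.'::t
theorem pv_suffix_iff (l t q : List Char) (m : ℕ)
    (hm : l.drop m = '.' :: t) (ht : '.' ∉ t) (hq : '.' ∉ q) :
    (('.' :: q) <:+ l) ↔ q = t := by
  constructor
  · rintro ⟨u, hu⟩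
    -- positions: dot at u.length (from hu) and at m (from hm); both are "last dots"
    have hlen : l.length = u.length + (q.length + 1) := by
      rw [← hu]; simp
    have hml : m < l.length := by
      have := congrArg List.length hm
      simp at this; omega
    have hdotm : l[m]? = some '.' := by
      have : (l.drop m)[0]? = some '.' := by rw [hm]; rfl
      simpa using this
    have hdotu : l[u.length]? = some '.' := by
      rw [← hu]
      rw [List.getElem?_append_right (Nat.le_refl _)]
      simp
    -- no dot strictly after m
    have hafterm : ∀ j, m < j → l[j]? ≠ some '.' := by
      intro j hj hcon
      have hjl : j < l.length := by
        by_contra hge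
        rw [List.getElem?_eq_none (by omega)] at hcon; cases hcon
      have : (l.drop m)[j - m]? = some '.' := by
        rw [List.getElem?_drop]; rw [show m + (j - m) = j by omega]; exact hcon
      rw [hm] at this
      have hjm : j - m = (j - m - 1) + 1 := by omega
      rw [hjm] at this
      simp at this
      exact ht (List.mem_of_getElem? this)
    -- no dot strictly after u.length
    have hafteru : ∀ j, u.length < j → l[j]? ≠ some '.' := by
      intro j hj hcon
      rw [← hu, List.getElem?_append_right (by omega)] at hcon
      have hji : j - u.length = (j - u.length - 1) + 1 := by omega
      rw [hji] at hcon
      simp at hcon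
      exact hq (List.mem_of_getElem? hcon)
    have heq : m = u.length := by
      rcases Nat.lt_trichotomy m u.length with h1 | h1 | h1
      · exact absurd hdotu (hafterm _ h1)
      · exact h1
      · exact absurd hdotm (hafteru _ h1)
    have : l.drop m = '.' :: q := by
      rw [heq, ← hu, List.drop_left' rfl]
    rw [hm] at this
    exact (List.cons.injEq _ _ _ _ ▸ this).2.symm
  · rintro rfl
    exact ⟨l.take m, by rw [← hm]; exact List.take_append_drop m l⟩

-- from the rfind spec at n = l.length: the found position is the last dot
theorem pv_rfind_cases (l : List Char) :
    (PySem.Chars.rfind l ['.'] = -1 ∧ ∀ j : ℕ, l[j]? ≠ some '.') ∨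
    (∃ (m : ℕ) (t : List Char), PySem.Chars.rfind l ['.'] = (m : ℤ) ∧ l.drop m = '.' :: t ∧ '.' ∉ t) := by
  have h := pv_go_spec l l.length
  rcases h with ⟨he, hall⟩ | ⟨m, he, hm, hdot, hafter⟩
  · left
    refine ⟨he, fun j hcon => ?_⟩
    rcases Nat.lt_or_ge j l.length with h1 | h1
    · exact hall j (by omega) hcon
    · rw [List.getElem?_eq_none h1] at hcon; cases hcon
  · right
    have hml : m < l.length := by
      by_contra hge
      rw [List.getElem?_eq_none (by omega)] at hdot; cases hdot
    refine ⟨m, l.drop (m + 1), he, ?_, ?_⟩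
    · have := List.getElem?_eq_some_iff.1 hdot
      rcases this with ⟨hlt, hv⟩
      rw [List.drop_eq_getElem_cons hlt, hv]
    · intro hmem
      rcases List.getElem?_of_mem hmem with ⟨i, hi⟩
      have : l[m + 1 + i]? = some '.' := by
        rw [← List.getElem?_drop]; exact hi
      rcases Nat.lt_or_ge (m + 1 + i) l.length with h1 | h1
      · exact hafter _ (by omega) (by omega) this
      · rw [List.getElem?_eq_none h1] at this; cases this

-- endswith as a boolean equality on the tail after the last dot
theorem pv_endswith_eq (l t q : List Char) (m : ℕ)
    (hm : l.drop m = '.' :: t) (ht : '.' ∉ t) (hq : '.' ∉ q) :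
    PySem.Chars.endswith l ('.' :: q) = (q == t) := by
  by_cases h : q = t
  · have hsuf : ('.' :: q) <:+ l := (pv_suffix_iff l t q m hm ht hq).2 h
    rw [(PySem.Chars.endswith_iff l ('.' :: q)).2 hsuf, h]
    simp
  · have : ¬ ('.' :: q <:+ l) := fun hs => h ((pv_suffix_iff l t q m hm ht hq).1 hs)
    have hb : PySem.Chars.endswith l ('.' :: q) = false := by
      by_contra hb
      exact this ((PySem.Chars.endswith_iff _ _).1 (by revert hb; cases PySem.Chars.endswith l ('.' :: q) <;> simp))
    rw [hb]
    exact (by simp [h] : (q == t) = false).symm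

-- no dot in l: every dot-headed pattern fails endswith
theorem pv_endswith_false (l p : List Char) (hp : '.' ∈ p) (hnd : ∀ j : ℕ, l[j]? ≠ some '.') :
    PySem.Chars.endswith l p = false := by
  by_contra hb
  have hs : p <:+ l := (PySem.Chars.endswith_iff _ _).1 (by revert hb; cases PySem.Chars.endswith l p <;> simp)
  have : '.' ∈ l := hs.mem hp
  rcases List.getElem?_of_mem this with ⟨i, hi⟩
  exact hnd i hi

theorem pv_known : KNOWN_SUFFIXES = [".NS", ".BO", ".L", ".HK", ".T", ".AX", ".TO", ".SI", ".KS"] := by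
  decide

-- the common core: A's chain equals B's lookup on any (already uppercased) string
theorem pv_core (s : String) :
    (if PySem.Str.endswith s ".NS" then "NSE"
     else if PySem.Str.endswith s ".BO" then "BSE"
     else if PySem.Str.endswith s ".L" then "LSE"
     else if PySem.Str.endswith s ".HK" then "HKEX"
     else if PySem.Str.endswith s ".T" then "TSE"
     else if !(KNOWN_SUFFIXES.any (fun p => PySem.Str.endswith s p)) then "US"
     else "UNKNOWN")
    = (if PySem.Str.rfind s "." = -1 then "US"
       else SUFFIX_MAP.getD (PySem.Str.slice s (some (PySem.Str.rfind s "."))) "US") := by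
  have hrw : PySem.Str.rfind s "." = PySem.Chars.rfind s.toList ['.'] := PySem.Str.rfind_eq s "."
  rcases pv_rfind_cases s.toList with ⟨he, hnd⟩ | ⟨m, t, he, hm, ht⟩
  · -- no dot: both sides are "US"
    have hf : ∀ p : List Char, '.' ∈ p → PySem.Chars.endswith s.toList p = false :=
      fun p hp => pv_endswith_false _ p hp hnd
    rw [hrw, he]
    simp [PySem.Str.endswith_eq, pv_known,
      hf ['.','N','S'] (by decide), hf ['.','B','O'] (by decide), hf ['.','L'] (by decide),
      hf ['.','H','K'] (by decide), hf ['.','T'] (by decide), hf ['.','A','X'] (by decide),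
      hf ['.','T','O'] (by decide), hf ['.','S','I'] (by decide), hf ['.','K','S'] (by decide)]
  · -- dot found at m; the suffix is '.' :: t with t dot-free
    have hend : ∀ (p : String) (q : List Char), p.toList = '.' :: q → '.' ∉ q →
        PySem.Str.endswith s p = (q == t) := by
      intro p q hpq hq
      rw [PySem.Str.endswith_eq, hpq]
      exact pv_endswith_eq s.toList t q m hm ht hq
    have hkey : (PySem.Str.slice s (some ((m : ℤ)))).toList = '.' :: t := by
      rw [PySem.Str.toList_slice, PySem.Chars.slice]
      rw [PySem.List.slice_from s.toList (Int.natCast_nonneg m)]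
      simpa using hm
    rw [hrw, he]
    rw [if_neg (by omega : ¬ ((m : ℤ) = -1))]
    -- rewrite every endswith to a boolean equality on t
    rw [show (KNOWN_SUFFIXES.any (fun p => PySem.Str.endswith s p)) =
        (PySem.Str.endswith s ".NS" || PySem.Str.endswith s ".BO" || PySem.Str.endswith s ".L" ||
         PySem.Str.endswith s ".HK" || PySem.Str.endswith s ".T" || PySem.Str.endswith s ".AX" ||
         PySem.Str.endswith s ".TO" || PySem.Str.endswith s ".SI" || PySem.Str.endswith s ".KS") from by
      rw [pv_known]; simp [Bool.or_assoc]]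
    rw [hend ".NS" ['N','S'] rfl (by decide), hend ".BO" ['B','O'] rfl (by decide),
        hend ".L" ['L'] rfl (by decide), hend ".HK" ['H','K'] rfl (by decide),
        hend ".T" ['T'] rfl (by decide), hend ".AX" ['A','X'] rfl (by decide),
        hend ".TO" ['T','O'] rfl (by decide), hend ".SI" ['S','I'] rfl (by decide),
        hend ".KS" ['K','S'] rfl (by decide)]
    -- rewrite the dict lookup key comparisons to boolean equalities on t
    have hkeyeq : ∀ (p : String) (q : List Char), p.toList = '.' :: q → '.' ∉ q →
        (p == PySem.Str.slice s (some ((m : ℤ)))) = (q == t) := by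
      intro p q hpq hq
      by_cases h : q = t
      · have : p = PySem.Str.slice s (some ((m : ℤ))) :=
          String.toList_inj.1 (by rw [hpq, hkey, h])
        simp [this, h]
      · have : p ≠ PySem.Str.slice s (some ((m : ℤ))) := by
          intro hc
          apply h
          have := congrArg String.toList hc
          rw [hpq, hkey] at this
          exact (List.cons.injEq _ _ _ _ ▸ this).2
        simp [this, h]
    simp only [PySem.Dict.getD, PySem.Dict.get?, SUFFIX_MAP, List.find?,
      hkeyeq ".NS" ['N','S'] rfl (by decide), hkeyeq ".BO" ['B','O'] rfl (by decide),
      hkeyeq ".L" ['L'] rfl (by decide), hkeyeq ".HK" ['H','K'] rfl (by decide),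
      hkeyeq ".T" ['T'] rfl (by decide), hkeyeq ".AX" ['A','X'] rfl (by decide),
      hkeyeq ".TO" ['T','O'] rfl (by decide), hkeyeq ".SI" ['S','I'] rfl (by decide),
      hkeyeq ".KS" ['K','S'] rfl (by decide)]
    generalize (['N','S'] == t) = b1
    generalize (['B','O'] == t) = b2
    generalize (['L'] == t) = b3
    generalize (['H','K'] == t) = b4
    generalize (['T'] == t) = b5
    generalize (['A','X'] == t) = b6
    generalize (['T','O'] == t) = b7
    generalize (['S','I'] == t) = b8
    generalize (['K','S'] == t) = b9
    revert b1 b2 b3 b4 b5 b6 b7 b8 b9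
    decide

-- ===== VERDICT (by name: the statement is the Claim_ definition above) =====
theorem get_exchange_spec : Claim_equal_get_exchange := by
  intro symbol _
  unfold Spec_get_exchange get_exchange get_exchange_alt
  by_cases h : symbol = ""
  · simp [h]
  · simp only [h, if_false]
    exact pv_core (PySem.Str.upper symbol)
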